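-- pv_equiv track=rewrite | github.com/richedperson1/DSA | challeges/weekly gfg challenge/tree linkage.py | good_path_length
-- ===== SOURCE A (Python) =====
-- from collections import defaultdict, deque
--
-- def build_graph(edges):
--     graph = defaultdict(list)
--     for u, v in edges:
--         graph[u].append(v)
--         graph[v].append(u)
--     return graph
--
-- def bfs_farthest_node(graph, start):
--     visited = set()
--     queue = deque([(start, 0)])
--     visited.add(start)
--     farthest_node = start
--     max_distance = 0
--
--     while queue:
--         node, distance = queue.popleft()
--         if distance > max_distance:
--             max_distance = distance
--             farthest_node = node
--
--         for neighbor in graph[node]: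
--             if neighbor not in visited:
--                 visited.add(neighbor)
--                 queue.append((neighbor, distance + 1))
--
--     return farthest_node, max_distance
--
-- def longest_path_length(graph):
--     # Perform BFS to find the farthest node from an arbitrary start node (0)
--     u, _ = bfs_farthest_node(graph, 0)
--     # Perform BFS again from u to find the longest path in the tree
--     _, max_distance = bfs_farthest_node(graph, u)
--     return max_distance
--
-- def good_path_length(n, T1, T2):
--     T1_graph = build_graph(T1)
--     T2_graph = build_graph(T2)
--
--     result = []
--     for i in range(n):
--         # Create a combined graph
--         combined_graph = defaultdict(list, T1_graph)
--         for node in T2_graph: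
--             combined_graph[node].extend(T2_graph[node])
--         # Connect i-th nodes of T1 and T2
--         combined_graph[i].append(i)
--         combined_graph[i].append(i)
--
--         # Calculate the good path length
--         path_length = longest_path_length(combined_graph)
--         result.append(path_length)
--
--     return result
-- ===== SOURCE B (Python) =====
-- def good_path_length(n, T1, T2):
--     # The self-loop A adds at node i never changes any path, so every i gets
--     # the same answer: build the union graph once, run one level-by-level
--     # double BFS, and replicate that single value n times.
--     adj = {}
--     for a, b in [p for u, v in list(T1) + list(T2) for p in ((u, v), (v, u))]:
--         adj.setdefault(a, []).append(b)
--
--     def far_level(start):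
--         visited = {start}
--         frontier = [start]
--         far, dist = start, 0
--         while True:
--             nxt = []
--             for node in frontier:
--                 for nb in adj.get(node, []):
--                     if nb not in visited:
--                         visited.add(nb)
--                         nxt.append(nb)
--             if not nxt:
--                 return far, dist
--             far, dist = nxt[0], dist + 1
--             frontier = nxt
--
--     u, _ = far_level(0)
--     _, d = far_level(u)
--     return [d] * max(n, 0)
-- ===== Notes on version B (the rewrite author's own statement) =====
-- stated objective: faster
-- what changed: A rebuilds a combined graph and runs a queue-based double BFS for every i in range(n); B observes that the self-loop joining node i of T1 to node i of T2 never changes any path, so it builds the union adjacency once from the directed edge pairs, runs a single level-by-level (frontier) double BFS, and replicates that one answer n times.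
import Mathlib
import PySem

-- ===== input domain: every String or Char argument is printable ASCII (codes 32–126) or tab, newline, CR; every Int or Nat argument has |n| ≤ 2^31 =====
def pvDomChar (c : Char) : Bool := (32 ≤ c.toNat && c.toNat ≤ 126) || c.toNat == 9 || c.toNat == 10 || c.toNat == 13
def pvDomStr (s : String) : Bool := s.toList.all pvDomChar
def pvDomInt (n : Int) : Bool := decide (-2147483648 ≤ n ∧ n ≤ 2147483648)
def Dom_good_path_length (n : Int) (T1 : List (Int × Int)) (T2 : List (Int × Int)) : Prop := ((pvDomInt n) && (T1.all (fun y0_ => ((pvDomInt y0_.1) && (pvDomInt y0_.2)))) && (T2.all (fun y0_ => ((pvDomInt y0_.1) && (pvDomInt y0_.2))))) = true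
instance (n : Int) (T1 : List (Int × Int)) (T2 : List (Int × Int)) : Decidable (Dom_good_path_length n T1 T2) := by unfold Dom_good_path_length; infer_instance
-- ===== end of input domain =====

-- B replaces A's per-i rebuild-and-queue-double-BFS (the self-loop at i is a no-op) by ONE
-- level-by-level (frontier) double BFS on the union graph, replicated n times; equivalence
-- is on return values (Python A leaves its arguments unchanged).

-- ===== PORT A =====
-- build_graph: defaultdict(list); graph[u].append(v); graph[v].append(u)
def pvBuildStep (g : PySem.Dict Int (List Int)) (e : Int × Int) : PySem.Dict Int (List Int) :=
  let g1 := g.insert e.1 (g.getD e.1 [] ++ [e.2])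
  g1.insert e.2 (g1.getD e.2 [] ++ [e.1])

def build_graph (edges : List (Int × Int)) : PySem.Dict Int (List Int) :=
  edges.foldl pvBuildStep PySem.Dict.empty

-- body of 'for neighbor in graph[node]: if neighbor not in visited: …'
def bfsStep (dist : Int) (s : PySem.Set Int × List (Int × Int)) (nb : Int) :
    PySem.Set Int × List (Int × Int) :=
  if PySem.Set.contains s.1 nb then s
  else (PySem.Set.add s.1 nb, s.2 ++ [(nb, dist + 1)])

-- all adjacency entries of the graph
def nodesOf (g : PySem.Dict Int (List Int)) : List Int := g.values.flatten

-- the 'while queue:' loop; the fuel 2*|adjacency entries|+1 is proved sufficient below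
-- (bfsAux_fuel_irrel/phi_step), so this is exactly the Python loop.
def bfsAux (g : PySem.Dict Int (List Int)) :
    Nat → List (Int × Int) → PySem.Set Int → Int → Int → Int × Int
  | 0, _, _, far, md => (far, md)
  | _ + 1, [], _, far, md => (far, md)
  | f + 1, (node, dist) :: rest, visited, far, md =>
    let fm := if md < dist then (node, dist) else (far, md)
    let st := (g.getD node []).foldl (bfsStep dist) (visited, rest)
    bfsAux g f st.2 st.1 fm.1 fm.2

def bfsFuel (g : PySem.Dict Int (List Int)) : Nat := 2 * (nodesOf g).length + 1

def bfs_farthest_node (g : PySem.Dict Int (List Int)) (start : Int) : Int × Int :=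
  bfsAux g (bfsFuel g) [(start, 0)] (PySem.Set.add PySem.Set.empty start) start 0

def longest_path_length (g : PySem.Dict Int (List Int)) : Int :=
  (bfs_farthest_node g (bfs_farthest_node g 0).1).2

-- combined_graph = defaultdict(list, T1_graph); for node in T2_graph: combined[node].extend(T2_graph[node])
def pvCombine (T1g T2g : PySem.Dict Int (List Int)) : PySem.Dict Int (List Int) :=
  T2g.keys.foldl (fun c node => c.insert node (c.getD node [] ++ T2g.getD node [])) T1g

-- Port note: Python's 'defaultdict(list, T1_graph)' shares the adjacency LISTS with
-- T1_graph, so across iterations T1_graph accumulates duplicate adjacency entries and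
-- the self-loops [i, i]; duplicates and self-loops never change what the BFS returns
-- (the visited set skips them), so this value-semantics port returns exactly what the
-- Python returns on every input.
def good_path_length (n : Int) (T1 : List (Int × Int)) (T2 : List (Int × Int)) : List Int :=
  let T1g := build_graph T1
  let T2g := build_graph T2
  (PySem.List.pyRange 0 n 1).foldl (fun res i =>
    let c := pvCombine T1g T2g
    let c2 := c.insert i (c.getD i [] ++ [i, i])
    res ++ [longest_path_length c2]) []

-- ===== PORT B =====
-- adj built from the directed pair list [(u,v),(v,u) for each edge] via setdefault/append
def pvAdjB (T1 T2 : List (Int × Int)) : PySem.Dict Int (List Int) :=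
  ((T1 ++ T2).flatMap (fun e => [(e.1, e.2), (e.2, e.1)])).foldl
    (fun g p => g.insert p.1 (g.getD p.1 [] ++ [p.2])) PySem.Dict.empty

-- 'if nb not in visited: visited.add(nb); nxt.append(nb)'
def pvInnerStep (s : PySem.Set Int × List Int) (nb : Int) : PySem.Set Int × List Int :=
  if PySem.Set.contains s.1 nb then s else (PySem.Set.add s.1 nb, s.2 ++ [nb])

-- 'for nb in adj.get(node, []): …'
def pvLevelStep (g : PySem.Dict Int (List Int)) (s : PySem.Set Int × List Int) (node : Int) :
    PySem.Set Int × List Int :=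
  (g.getD node []).foldl pvInnerStep s

-- the 'while True:' level loop of far_level; fuel |adjacency entries|+2 is proved
-- sufficient below (pvLevelAux_fuel_irrel), so this is exactly the Python loop.
def pvLevelAux (g : PySem.Dict Int (List Int)) :
    Nat → List Int → PySem.Set Int → Int → Int → Int × Int
  | 0, _, _, far, d => (far, d)
  | f + 1, frontier, visited, far, d =>
    let st := frontier.foldl (pvLevelStep g) (visited, [])
    match st.2 with
    | [] => (far, d)
    | x :: rest => pvLevelAux g f (x :: rest) st.1 x (d + 1)

def pvFarLevel (g : PySem.Dict Int (List Int)) (start : Int) : Int × Int :=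
  pvLevelAux g (g.values.flatten.length + 2) [start] (PySem.Set.add PySem.Set.empty start) start 0

def good_path_length_alt (n : Int) (T1 : List (Int × Int)) (T2 : List (Int × Int)) : List Int :=
  let g := pvAdjB T1 T2
  List.replicate (max n 0).toNat (pvFarLevel g (pvFarLevel g 0).1).2

-- ===== PRECONDITION & SPEC =====
def Spec_good_path_length (n : Int) (T1 : List (Int × Int)) (T2 : List (Int × Int)) (out : List Int) : Prop := out = good_path_length_alt n T1 T2
instance (n : Int) (T1 : List (Int × Int)) (T2 : List (Int × Int)) (out : List Int) : Decidable (Spec_good_path_length n T1 T2 out) := by unfold Spec_good_path_length; infer_instance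

-- ===== CLAIM (what is proved, stated in full; the proofs are below) =====
def Claim_equal_good_path_length : Prop := ∀ (n : Int) (T1 : List (Int × Int)) (T2 : List (Int × Int)), Dom_good_path_length n T1 T2 → Spec_good_path_length n T1 T2 (good_path_length n T1 T2)

-- ===== LEMMAS AND PROOFS =====

-- the fresh (not yet visited) elements of l, in discovery order
def freshList : List Int → PySem.Set Int → List Int
  | [], _ => []
  | x :: xs, v =>
    if PySem.Set.contains v x then freshList xs v else x :: freshList xs (PySem.Set.add v x)

theorem foldl_bfsStep_eq (l : List Int) :
    ∀ (v : PySem.Set Int) (q : List (Int × Int)) (dist : Int),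
      l.foldl (bfsStep dist) (v, q)
        = (v ++ freshList l v, q ++ (freshList l v).map (fun x => (x, dist + 1))) := by
  induction l with
  | nil => intro v q dist; simp [freshList]
  | cons x xs ih =>
    intro v q dist
    by_cases hmem : x ∈ v
    · have hstep : bfsStep dist (v, q) x = (v, q) := by simp [bfsStep, hmem]
      simp only [freshList, hmem, if_pos, List.foldl_cons]
      rw [hstep, ih v q dist]
      simp [hmem]
    · have hadd : PySem.Set.add v x = v ++ [x] := PySem.Set.add_of_not_mem hmem
      have hstep : bfsStep dist (v, q) x = (v ++ [x], q ++ [(x, dist + 1)]) := by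
        simp [bfsStep, hmem, hadd]
      simp only [freshList, hmem, List.foldl_cons]
      rw [hstep, ih (v ++ [x]) (q ++ [(x, dist + 1)]) dist, hadd]
      simp [hmem]

theorem foldl_innerStep_eq (l : List Int) :
    ∀ (v : PySem.Set Int) (q : List Int),
      l.foldl pvInnerStep (v, q) = (v ++ freshList l v, q ++ freshList l v) := by
  induction l with
  | nil => intro v q; simp [freshList]
  | cons x xs ih =>
    intro v q
    by_cases hmem : x ∈ v
    · have hstep : pvInnerStep (v, q) x = (v, q) := by simp [pvInnerStep, hmem]
      simp only [freshList, hmem, if_pos, List.foldl_cons]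
      rw [hstep, ih v q]
      simp [hmem]
    · have hadd : PySem.Set.add v x = v ++ [x] := PySem.Set.add_of_not_mem hmem
      have hstep : pvInnerStep (v, q) x = (v ++ [x], q ++ [x]) := by
        simp [pvInnerStep, hmem, hadd]
      simp only [freshList, hmem, List.foldl_cons]
      rw [hstep, ih (v ++ [x]) (q ++ [x]), hadd]
      simp [hmem]

theorem freshList_props (l : List Int) :
    ∀ (v : PySem.Set Int), (freshList l v).Nodup ∧ ∀ x ∈ freshList l v, x ∉ v ∧ x ∈ l := by
  induction l with
  | nil => intro v; simp [freshList]
  | cons x xs ih =>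
    intro v
    by_cases hmem : x ∈ v
    · obtain ⟨hnd, hp⟩ := ih v
      refine ⟨by simpa [freshList, hmem] using hnd, ?_⟩
      intro y hy
      rw [freshList, if_pos (by simpa using hmem)] at hy
      exact ⟨(hp y hy).1, List.mem_cons_of_mem _ (hp y hy).2⟩
    · have hadd : PySem.Set.add v x = v ++ [x] := PySem.Set.add_of_not_mem hmem
      obtain ⟨hnd, hp⟩ := ih (PySem.Set.add v x)
      have hxf : x ∉ freshList xs (PySem.Set.add v x) := by
        intro hx
        exact (hp x hx).1 (by rw [hadd]; exact List.mem_append_right _ (List.mem_singleton.mpr rfl))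
      refine ⟨?_, ?_⟩
      · rw [freshList, if_neg (by simpa using hmem)]
        exact List.nodup_cons.mpr ⟨hxf, hnd⟩
      · intro y hy
        rw [freshList, if_neg (by simpa using hmem)] at hy
        rcases List.mem_cons.mp hy with h | h
        · subst h; exact ⟨hmem, List.mem_cons_self⟩
        · refine ⟨fun hv => (hp y h).1 ?_, List.mem_cons_of_mem _ (hp y h).2⟩
          rw [hadd]; exact List.mem_append_left _ hv

-- the inner neighbor loop appends the fresh neighbors (first occurrences not yet visited)
theorem foldStep_spec (l : List Int) (v : PySem.Set Int) (q : List (Int × Int)) (dist : Int) :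
    ∃ new : List Int,
      l.foldl (bfsStep dist) (v, q) = (v ++ new, q ++ new.map (fun x => (x, dist + 1)))
      ∧ new.Nodup ∧ ∀ x ∈ new, x ∉ v ∧ x ∈ l :=
  ⟨freshList l v, foldl_bfsStep_eq l v q dist,
    (freshList_props l v).1, (freshList_props l v).2⟩

theorem mem_nodesOf_of_mem_getD (g : PySem.Dict Int (List Int)) (k x : Int)
    (h : x ∈ g.getD k []) : x ∈ nodesOf g := by
  rw [PySem.Dict.getD_eq_get?_getD] at h
  cases hg : g.get? k with
  | none => rw [hg] at h; simp at h
  | some val =>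
    rw [hg] at h
    have hkv := PySem.Dict.mem_items_of_get?_eq_some g hg
    have hv : val ∈ g.values := List.mem_map.mpr ⟨(k, val), hkv, rfl⟩
    exact List.mem_flatten.mpr ⟨val, hv, h⟩

theorem exists_getD_of_mem_nodesOf (g : PySem.Dict Int (List Int)) (x : Int)
    (hnd : g.keys.Nodup) (h : x ∈ nodesOf g) : ∃ k, x ∈ g.getD k [] := by
  obtain ⟨val, hvmem, hx⟩ := List.mem_flatten.mp h
  obtain ⟨⟨k, v⟩, hkv, rfl⟩ := List.mem_map.mp hvmem
  exact ⟨k, by rw [PySem.Dict.getD_of_mem_items g hkv hnd []]; exact hx⟩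

-- counting: removing the fresh nodes from the unvisited pool
theorem length_filter_not_append (D v new : List Int) (hD : D.Nodup) (hn : new.Nodup)
    (hnew : ∀ x ∈ new, x ∉ v ∧ x ∈ D) :
    (D.filter (fun x => decide (x ∉ v ++ new))).length + new.length
      = (D.filter (fun x => decide (x ∉ v))).length := by
  have hsplit := List.length_eq_length_filter_add
    (l := D.filter (fun x => decide (x ∉ v))) (fun x => decide (x ∈ new))
  have h1 : ((D.filter (fun x => decide (x ∉ v))).filter (fun x => decide (x ∈ new))).length
      = new.length := by
    refine ((List.perm_ext_iff_of_nodup ((hD.filter _).filter _) hn).mpr ?_).length_eq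
    intro a
    simp only [List.mem_filter, decide_eq_true_eq]
    constructor
    · rintro ⟨_, ha⟩; exact ha
    · intro ha; exact ⟨⟨(hnew a ha).2, (hnew a ha).1⟩, ha⟩
  have h2 : (D.filter (fun x => decide (x ∉ v))).filter (fun x => !decide (x ∈ new))
      = D.filter (fun x => decide (x ∉ v ++ new)) := by
    rw [List.filter_filter]
    apply List.filter_congr
    intro x _
    simp [List.mem_append]
    rw [Bool.and_comm]
  rw [h2] at hsplit
  omega

def ucount (g : PySem.Dict Int (List Int)) (v : List Int) : Nat :=
  ((PySem.List.dedup (nodesOf g)).filter (fun x => decide (x ∉ v))).length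

theorem ucount_append_le (g : PySem.Dict Int (List Int)) (v w : List Int) :
    ucount g (v ++ w) ≤ ucount g v := by
  unfold ucount
  induction PySem.List.dedup (nodesOf g) with
  | nil => simp
  | cons a D ih =>
    simp only [List.filter_cons]
    by_cases hvw : a ∈ v ++ w
    · have hv2 : ¬ (a ∉ v ++ w) := not_not_intro hvw
      by_cases hv : a ∈ v
      · simp only [decide_eq_true_eq]
        rw [if_neg hv2, if_neg (by simpa using hv)]
        exact ih
      · simp only [decide_eq_true_eq]
        rw [if_neg hv2, if_pos (by simpa using hv)]
        simp only [List.length_cons]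
        omega
    · have hv : a ∉ v := fun h => hvw (List.mem_append_left _ h)
      simp only [decide_eq_true_eq]
      rw [if_pos (by simpa using hvw), if_pos (by simpa using hv)]
      simp only [List.length_cons]
      omega

def phi (g : PySem.Dict Int (List Int)) (q : List (Int × Int)) (v : List Int) : Nat :=
  2 * ucount g v + q.length

theorem phi_step (g : PySem.Dict Int (List Int)) (node dist : Int)
    (rest : List (Int × Int)) (v : PySem.Set Int) :
    phi g ((g.getD node []).foldl (bfsStep dist) (v, rest)).2
        ((g.getD node []).foldl (bfsStep dist) (v, rest)).1 + 1
      ≤ phi g ((node, dist) :: rest) v := by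
  obtain ⟨new, heq, hnd, hprop⟩ := foldStep_spec (g.getD node []) v rest dist
  rw [heq]
  have hcount := length_filter_not_append (PySem.List.dedup (nodesOf g)) v new
    (PySem.List.nodup_dedup _) hnd (fun x hx =>
      ⟨(hprop x hx).1, (PySem.List.mem_dedup _ _).mpr (mem_nodesOf_of_mem_getD g node x (hprop x hx).2)⟩)
  simp only [phi, ucount, List.length_append, List.length_map, List.length_cons]
  omega

theorem bfsAux_fuel_irrel (g : PySem.Dict Int (List Int)) :
    ∀ (f₁ f₂ : Nat) (q : List (Int × Int)) (v : PySem.Set Int) (far md : Int),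
      phi g q v ≤ f₁ → phi g q v ≤ f₂ →
      bfsAux g f₁ q v far md = bfsAux g f₂ q v far md := by
  intro f₁
  induction f₁ with
  | zero =>
    intro f₂ q v far md h1 _
    have hq : q = [] := by
      cases q with
      | nil => rfl
      | cons p rest => simp [phi] at h1
    subst hq
    cases f₂ <;> rfl
  | succ f ih =>
    intro f₂ q v far md h1 h2
    match q with
    | [] => cases f₂ <;> rfl
    | (node, dist) :: rest =>
      have hphi : 1 ≤ phi g ((node, dist) :: rest) v := by simp [phi]; omega
      match f₂, h2 with
      | f₂' + 1, h2 =>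
        simp only [bfsAux]
        apply ih
        · have := phi_step g node dist rest v; omega
        · have := phi_step g node dist rest v; omega

-- a self-loop at i changes no BFS outcome
theorem bfsAux_selfloop (g' g : PySem.Dict Int (List Int)) (i : Int)
    (hx : ∀ x, g'.getD x [] = g.getD x [] ++ (if x = i then [i, i] else [])) :
    ∀ (f : Nat) (q : List (Int × Int)) (v : PySem.Set Int) (far md : Int),
      (∀ p ∈ q, p.1 ∈ v) →
      bfsAux g' f q v far md = bfsAux g f q v far md := by
  intro f
  induction f with
  | zero => intros; rfl
  | succ f ih =>
    intro q v far md hq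
    match q with
    | [] => rfl
    | (node, dist) :: rest =>
      obtain ⟨new, heq, hnd, hprop⟩ := foldStep_spec (g.getD node []) v rest dist
      have hfold : (g'.getD node []).foldl (bfsStep dist) (v, rest)
          = (g.getD node []).foldl (bfsStep dist) (v, rest) := by
        rw [hx node, List.foldl_append]
        by_cases hni : node = i
        · subst hni
          have hnodev : node ∈ v := hq (node, dist) List.mem_cons_self
          have hm : node ∈ ((g.getD node []).foldl (bfsStep dist) (v, rest)).1 := by
            rw [heq]; exact List.mem_append_left _ hnodev
          have hstep : ∀ s : PySem.Set Int × List (Int × Int), node ∈ s.1 → bfsStep dist s node = s := by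
            intro s h; simp [bfsStep, h]
          simp only [if_true]
          rw [List.foldl_cons, hstep _ hm, List.foldl_cons, hstep _ hm, List.foldl_nil]
        · simp [hni]
      simp only [bfsAux]
      rw [hfold]
      apply ih
      intro p hp
      rw [heq] at hp ⊢
      rcases List.mem_append.mp hp with h | h
      · exact List.mem_append_left _ (hq p (List.mem_cons_of_mem _ h))
      · obtain ⟨y, hy, rfl⟩ := List.mem_map.mp h
        exact List.mem_append_right _ hy

theorem nodup_keys_build_fold (edges : List (Int × Int)) :
    ∀ g : PySem.Dict Int (List Int), g.keys.Nodup → (edges.foldl pvBuildStep g).keys.Nodup := by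
  induction edges with
  | nil => intro g h; exact h
  | cons e es ih =>
    intro g h
    exact ih _ (PySem.Dict.nodup_keys_insert _ _ _ (PySem.Dict.nodup_keys_insert _ _ _ h))

theorem getD_build_fold (edges : List (Int × Int)) :
    ∀ (g : PySem.Dict Int (List Int)) (x : Int),
      (edges.foldl pvBuildStep g).getD x []
        = g.getD x [] ++ (build_graph edges).getD x [] := by
  induction edges with
  | nil => intro g x; simp [build_graph, PySem.Dict.getD_empty]
  | cons e es ih =>
    intro g x
    have hstep : ∀ h : PySem.Dict Int (List Int),
        (pvBuildStep h e).getD x [] = h.getD x [] ++ (pvBuildStep PySem.Dict.empty e).getD x [] := by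
      intro h
      simp only [pvBuildStep, PySem.Dict.getD_insert, PySem.Dict.getD_empty]
      split_ifs <;> simp_all
    simp only [build_graph, List.foldl_cons]
    rw [ih (pvBuildStep g e) x, hstep g, ih (pvBuildStep PySem.Dict.empty e) x, List.append_assoc]

theorem getD_extend_fold (T2g : PySem.Dict Int (List Int)) (x : Int) :
    ∀ (ks : List Int), ks.Nodup → ∀ (c : PySem.Dict Int (List Int)),
      (ks.foldl (fun c node => c.insert node (c.getD node [] ++ T2g.getD node [])) c).getD x []
        = c.getD x [] ++ (if x ∈ ks then T2g.getD x [] else []) := by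
  intro ks
  induction ks with
  | nil => intro _ c; simp
  | cons k ks ih =>
    intro hnd c
    simp only [List.foldl_cons]
    rw [ih (List.nodup_cons.mp hnd).2, PySem.Dict.getD_insert]
    by_cases hxk : x = k
    · subst hxk
      have hxks : x ∉ ks := (List.nodup_cons.mp hnd).1
      simp [hxks]
    · simp [hxk, List.mem_cons]

theorem getD_combine (T1g T2g : PySem.Dict Int (List Int)) (hnd : T2g.keys.Nodup) (x : Int) :
    (pvCombine T1g T2g).getD x [] = T1g.getD x [] ++ T2g.getD x [] := by
  unfold pvCombine
  rw [getD_extend_fold T2g x T2g.keys hnd T1g]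
  by_cases hxk : x ∈ T2g.keys
  · simp [hxk]
  · have hc : T2g.contains x = false := by
      cases h : T2g.contains x with
      | false => rfl
      | true => exact absurd ((PySem.Dict.contains_iff_mem_keys _ _).mp h) hxk
    simp [hxk, PySem.Dict.getD_of_not_contains _ _ hc]

theorem fuel_suff (U H : PySem.Dict Int (List Int)) (s : Int)
    (hsub : ∀ x, x ∈ nodesOf U → x ∈ nodesOf H) :
    phi U [(s, 0)] [s] ≤ bfsFuel H := by
  have h1 : ucount U [s] ≤ (PySem.List.dedup (nodesOf U)).length := List.length_filter_le _ _
  have h2 : (PySem.List.dedup (nodesOf U)).length ≤ (nodesOf H).length :=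
    (List.subperm_of_subset (PySem.List.nodup_dedup _)
      (fun x hx => hsub x ((PySem.List.mem_dedup _ _).mp hx))).length_le
  simp only [phi, bfsFuel, List.length_cons, List.length_nil]
  omega

-- the per-iteration combined graph and the union graph run the same BFS
theorem bfs_far_eq (T1 T2 : List (Int × Int)) (i s : Int) :
    bfs_farthest_node ((pvCombine (build_graph T1) (build_graph T2)).insert i
        ((pvCombine (build_graph T1) (build_graph T2)).getD i [] ++ [i, i])) s
      = bfs_farthest_node (build_graph (T1 ++ T2)) s := by
  set T1g := build_graph T1 with hT1g
  set T2g := build_graph T2 with hT2g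
  set c := pvCombine T1g T2g with hc
  set c2 := c.insert i (c.getD i [] ++ [i, i]) with hc2def
  set U := build_graph (T1 ++ T2) with hUdef
  have hT2nd : T2g.keys.Nodup := nodup_keys_build_fold T2 _ PySem.Dict.nodup_keys_empty
  have hUnd : U.keys.Nodup := nodup_keys_build_fold (T1 ++ T2) _ PySem.Dict.nodup_keys_empty
  have hcU : ∀ x, c.getD x [] = U.getD x [] := by
    intro x
    rw [hc, getD_combine _ _ hT2nd x]
    have : U.getD x [] = T1g.getD x [] ++ T2g.getD x [] := by
      rw [hUdef]
      show ((T1 ++ T2).foldl pvBuildStep PySem.Dict.empty).getD x [] = _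
      rw [List.foldl_append, getD_build_fold T2 (T1.foldl pvBuildStep PySem.Dict.empty) x]
      rfl
    rw [this]
  have hc2U : ∀ x, c2.getD x [] = U.getD x [] ++ (if x = i then [i, i] else []) := by
    intro x
    rw [hc2def, PySem.Dict.getD_insert]
    by_cases hxi : x = i
    · subst hxi; simp [hcU x]
    · simp [hxi, hcU x]
  have hsub : ∀ x, x ∈ nodesOf U → x ∈ nodesOf c2 := by
    intro x hxU
    obtain ⟨k, hk⟩ := exists_getD_of_mem_nodesOf U x hUnd hxU
    exact mem_nodesOf_of_mem_getD c2 k x (by rw [hc2U k]; exact List.mem_append_left _ hk)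
  have hv0 : PySem.Set.add PySem.Set.empty s = [s] := by
    exact PySem.Set.add_of_not_mem List.not_mem_nil
  unfold bfs_farthest_node
  rw [hv0]
  calc bfsAux c2 (bfsFuel c2) [(s, 0)] [s] s 0
      = bfsAux U (bfsFuel c2) [(s, 0)] [s] s 0 :=
        bfsAux_selfloop c2 U i hc2U _ _ _ _ _ (by intro p hp; simp at hp; simp [hp])
    _ = bfsAux U (bfsFuel U) [(s, 0)] [s] s 0 :=
        bfsAux_fuel_irrel U _ _ _ _ _ _ (fuel_suff U c2 s hsub) (fuel_suff U U s (fun _ h => h))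

-- ---- level BFS (B) equals queue BFS (A) ----

-- all fresh nodes discovered while scanning a whole frontier
def pvFF (g : PySem.Dict Int (List Int)) : List Int → PySem.Set Int → List Int
  | [], _ => []
  | node :: rest, v =>
    freshList (g.getD node []) v ++ pvFF g rest (v ++ freshList (g.getD node []) v)

theorem foldl_levelStep_eq (g : PySem.Dict Int (List Int)) (fr : List Int) :
    ∀ (v : PySem.Set Int) (q : List Int),
      fr.foldl (pvLevelStep g) (v, q) = (v ++ pvFF g fr v, q ++ pvFF g fr v) := by
  induction fr with
  | nil => intro v q; simp [pvFF]
  | cons node rest ih =>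
    intro v q
    have hstep : pvLevelStep g (v, q) node
        = (v ++ freshList (g.getD node []) v, q ++ freshList (g.getD node []) v) :=
      foldl_innerStep_eq (g.getD node []) v q
    simp only [List.foldl_cons]
    rw [hstep, ih]
    simp [pvFF, List.append_assoc]

theorem pvFF_props (g : PySem.Dict Int (List Int)) (fr : List Int) :
    ∀ (v : PySem.Set Int), (pvFF g fr v).Nodup ∧ ∀ x ∈ pvFF g fr v, x ∉ v ∧ x ∈ nodesOf g := by
  induction fr with
  | nil => intro v; simp [pvFF]
  | cons node rest ih =>
    intro v
    obtain ⟨hfnd, hfp⟩ := freshList_props (g.getD node []) v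
    obtain ⟨hrnd, hrp⟩ := ih (v ++ freshList (g.getD node []) v)
    constructor
    · rw [pvFF]
      refine List.Nodup.append hfnd hrnd ?_
      intro x hxf hxr
      exact (hrp x hxr).1 (List.mem_append_right _ hxf)
    · intro x hx
      rw [pvFF] at hx
      rcases List.mem_append.mp hx with h | h
      · exact ⟨(hfp x h).1, mem_nodesOf_of_mem_getD g node x (hfp x h).2⟩
      · exact ⟨fun hv => (hrp x h).1 (List.mem_append_left _ hv), (hrp x h).2⟩

theorem ucount_FF (g : PySem.Dict Int (List Int)) (fr : List Int) (v : PySem.Set Int) :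
    ucount g (v ++ pvFF g fr v) + (pvFF g fr v).length = ucount g v := by
  obtain ⟨hnd, hprop⟩ := pvFF_props g fr v
  exact length_filter_not_append (PySem.List.dedup (nodesOf g)) v (pvFF g fr v)
    (PySem.List.nodup_dedup _) hnd (fun x hx =>
      ⟨(hprop x hx).1, (PySem.List.mem_dedup _ _).mpr (hprop x hx).2⟩)

theorem pvLevelAux_fuel_irrel (g : PySem.Dict Int (List Int)) :
    ∀ (f₁ f₂ : Nat) (fr : List Int) (v : PySem.Set Int) (far d : Int),
      ucount g v + 1 ≤ f₁ → ucount g v + 1 ≤ f₂ →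
      pvLevelAux g f₁ fr v far d = pvLevelAux g f₂ fr v far d := by
  intro f₁
  induction f₁ with
  | zero => intro f₂ fr v far d h1 _; omega
  | succ f ih =>
    intro f₂ fr v far d h1 h2
    match f₂, h2 with
    | f₂' + 1, h2 =>
      simp only [pvLevelAux]
      rw [foldl_levelStep_eq g fr v []]
      simp only [List.nil_append]
      cases hFF : pvFF g fr v with
      | nil => rfl
      | cons x rest =>
        have hc := ucount_FF g fr v
        rw [hFF] at hc
        simp only [List.length_cons] at hc
        apply ih
        · omega
        · omega

-- mid-level state of the level loop: remaining frontier 'cur', next level built so far 'nxt'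
def pvLevelMid (g : PySem.Dict Int (List Int)) (f : Nat) (cur nxt : List Int)
    (v : PySem.Set Int) (far d : Int) : Int × Int :=
  let st := cur.foldl (pvLevelStep g) (v, nxt)
  match st.2 with
  | [] => (far, d)
  | x :: rest => pvLevelAux g f (x :: rest) st.1 x (d + 1)

theorem pvLevelAux_succ (g : PySem.Dict Int (List Int)) (f : Nat) (fr : List Int)
    (v : PySem.Set Int) (far d : Int) :
    pvLevelAux g (f + 1) fr v far d = pvLevelMid g f fr [] v far d := rfl

theorem pvLevelMid_fuel_irrel (g : PySem.Dict Int (List Int)) (f₁ f₂ : Nat)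
    (cur nxt : List Int) (v : PySem.Set Int) (far d : Int)
    (h1 : ucount g v + 1 ≤ f₁) (h2 : ucount g v + 1 ≤ f₂) :
    pvLevelMid g f₁ cur nxt v far d = pvLevelMid g f₂ cur nxt v far d := by
  unfold pvLevelMid
  rw [foldl_levelStep_eq g cur v nxt]
  simp only []
  cases hFF : nxt ++ pvFF g cur v with
  | nil => rfl
  | cons x rest =>
    have hle := ucount_append_le g v (pvFF g cur v)
    exact pvLevelAux_fuel_irrel g f₁ f₂ (x :: rest) (v ++ pvFF g cur v) x (d + 1)
      (by omega) (by omega)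

theorem pvLevelMid_cons (g : PySem.Dict Int (List Int)) (f : Nat) (c : Int) (cs nxt : List Int)
    (v : PySem.Set Int) (far d : Int) :
    pvLevelMid g f (c :: cs) nxt v far d
      = pvLevelMid g f cs (nxt ++ freshList (g.getD c []) v)
          (v ++ freshList (g.getD c []) v) far d := by
  unfold pvLevelMid
  rw [List.foldl_cons]
  have hstep : pvLevelStep g (v, nxt) c
      = (v ++ freshList (g.getD c []) v, nxt ++ freshList (g.getD c []) v) :=
    foldl_innerStep_eq (g.getD c []) v nxt
  rw [hstep]

-- the bridge: A's queue BFS, mid-level, equals B's level BFS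
theorem bridge (g : PySem.Dict Int (List Int)) :
    ∀ (f₁ : Nat) (cur nxt : List Int) (v : PySem.Set Int) (far d : Int) (f₂ : Nat),
      phi g (cur.map (fun x => (x, d)) ++ nxt.map (fun x => (x, d + 1))) v ≤ f₁ →
      ucount g v + 1 ≤ f₂ →
      bfsAux g f₁ (cur.map (fun x => (x, d)) ++ nxt.map (fun x => (x, d + 1))) v far d
        = pvLevelMid g f₂ cur nxt v far d := by
  intro f₁
  induction f₁ with
  | zero =>
    intro cur nxt v far d f₂ h1 _
    have hlen : cur.length + nxt.length = 0 := by
      simp only [phi, List.length_append, List.length_map] at h1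
      omega
    have hcur : cur = [] := List.eq_nil_of_length_eq_zero (by omega)
    have hnxt : nxt = [] := List.eq_nil_of_length_eq_zero (by omega)
    subst hcur; subst hnxt
    simp [bfsAux, pvLevelMid]
  | succ f ih =>
    intro cur nxt v far d f₂ h1 h2
    cases cur with
    | cons c cs =>
      have hq : (c :: cs).map (fun x => (x, d)) ++ nxt.map (fun x => (x, d + 1))
          = (c, d) :: (cs.map (fun x => (x, d)) ++ nxt.map (fun x => (x, d + 1))) := by simp
      rw [hq] at h1 ⊢
      have hst := foldl_bfsStep_eq (g.getD c [])
        v (cs.map (fun x => (x, d)) ++ nxt.map (fun x => (x, d + 1))) d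
      have hps := phi_step g c d (cs.map (fun x => (x, d)) ++ nxt.map (fun x => (x, d + 1))) v
      rw [hst] at hps
      simp only [bfsAux, lt_irrefl, if_neg, if_false]
      rw [hst]
      simp only []
      have hre : cs.map (fun x => (x, d)) ++ nxt.map (fun x => (x, d + 1))
            ++ (freshList (g.getD c []) v).map (fun x => (x, d + 1))
          = cs.map (fun x => (x, d)) ++ (nxt ++ freshList (g.getD c []) v).map (fun x => (x, d + 1)) := by
        simp [List.append_assoc]
      rw [hre]
      rw [ih cs (nxt ++ freshList (g.getD c []) v) (v ++ freshList (g.getD c []) v) far d f₂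
        (by rw [hre] at hps; simp only [phi] at hps h1 ⊢; omega)
        (le_trans (by have := ucount_append_le g v (freshList (g.getD c []) v); omega) h2)]
      rw [pvLevelMid_cons]
    | nil =>
      cases nxt with
      | nil => simp [bfsAux, pvLevelMid]
      | cons x rest =>
        have hq : ([] : List Int).map (fun y => (y, d)) ++ (x :: rest).map (fun y => (y, d + 1))
            = (x, d + 1) :: rest.map (fun y => (y, d + 1)) := by simp
        rw [hq] at h1 ⊢
        have hst := foldl_bfsStep_eq (g.getD x []) v (rest.map (fun y => (y, d + 1))) (d + 1)
        have hps := phi_step g x (d + 1) (rest.map (fun y => (y, d + 1))) v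
        rw [hst] at hps
        have hdl : d < d + 1 := by omega
        simp only [bfsAux, if_pos hdl]
        rw [hst]
        simp only []
        rw [ih rest (freshList (g.getD x []) v) (v ++ freshList (g.getD x []) v) x (d + 1)
          (ucount g (v ++ freshList (g.getD x []) v) + 1)
          (by simp only [phi] at hps h1 ⊢; omega) (by omega)]
        -- now massage the RHS
        have hmid : pvLevelMid g f₂ [] (x :: rest) v far d
            = pvLevelAux g f₂ (x :: rest) v x (d + 1) := rfl
        rw [hmid]
        rw [pvLevelAux_fuel_irrel g f₂ (ucount g v + 2) (x :: rest) v x (d + 1) h2 (by omega)]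
        rw [pvLevelAux_succ]
        rw [pvLevelMid_cons]
        simp only [List.nil_append]
        have hle := ucount_append_le g v (freshList (g.getD x []) v)
        exact (pvLevelMid_fuel_irrel g _ _ rest (freshList (g.getD x []) v)
          (v ++ freshList (g.getD x []) v) x (d + 1) (by omega) (by omega)).symm

theorem bfs_eq_level (g : PySem.Dict Int (List Int)) (s : Int) :
    bfs_farthest_node g s = pvFarLevel g s := by
  have hv0 : PySem.Set.add PySem.Set.empty s = [s] :=
    PySem.Set.add_of_not_mem List.not_mem_nil
  unfold bfs_farthest_node pvFarLevel
  rw [hv0]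
  have hb := bridge g (bfsFuel g) [s] [] [s] s 0 (ucount g [s] + 1)
    (by simpa using fuel_suff g g s (fun _ h => h)) (by omega)
  simp only [List.map_cons, List.map_nil, List.nil_append, List.append_nil] at hb
  rw [hb, ← pvLevelAux_succ]
  have h1 : ucount g [s] ≤ (PySem.List.dedup (nodesOf g)).length := List.length_filter_le _ _
  have h2 : (PySem.List.dedup (nodesOf g)).length ≤ (nodesOf g).length :=
    (List.subperm_of_subset (PySem.List.nodup_dedup _)
      (fun x hx => (PySem.List.mem_dedup _ _).mp hx)).length_le
  have hn : (nodesOf g).length = g.values.flatten.length := rfl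
  exact pvLevelAux_fuel_irrel g (ucount g [s] + 2) (g.values.flatten.length + 2)
    [s] [s] s 0 (by omega) (by omega)

theorem adjB_fold (es : List (Int × Int)) :
    ∀ g : PySem.Dict Int (List Int),
      (es.flatMap (fun e => [(e.1, e.2), (e.2, e.1)])).foldl
        (fun g p => g.insert p.1 (g.getD p.1 [] ++ [p.2])) g
      = es.foldl pvBuildStep g := by
  induction es with
  | nil => intro g; rfl
  | cons e es ih =>
    intro g
    simp only [List.flatMap_cons, List.foldl_append, List.foldl_cons, List.foldl_nil]
    exact ih (pvBuildStep g e)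

theorem adjB_eq (T1 T2 : List (Int × Int)) : pvAdjB T1 T2 = build_graph (T1 ++ T2) :=
  adjB_fold (T1 ++ T2) PySem.Dict.empty

-- ===== VERDICT (by name: the statement is the Claim_ definition above) =====
theorem good_path_length_spec : Claim_equal_good_path_length := by
  unfold Claim_equal_good_path_length
  intro n T1 T2 _
  unfold Spec_good_path_length good_path_length good_path_length_alt
  simp only []
  rw [adjB_eq]
  set U := build_graph (T1 ++ T2) with hU
  set d := (pvFarLevel U (pvFarLevel U 0).1).2 with hd
  have hiter : ∀ i : Int,
      longest_path_length ((pvCombine (build_graph T1) (build_graph T2)).insert i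
        ((pvCombine (build_graph T1) (build_graph T2)).getD i [] ++ [i, i])) = d := by
    intro i
    unfold longest_path_length
    rw [bfs_far_eq T1 T2 i 0, bfs_far_eq T1 T2 i _, bfs_eq_level, bfs_eq_level]
  have hfold := PySem.List.foldl_append_singleton_eq_map
      (fun i : Int => longest_path_length ((pvCombine (build_graph T1) (build_graph T2)).insert i
        ((pvCombine (build_graph T1) (build_graph T2)).getD i [] ++ [i, i])))
      (PySem.List.pyRange 0 n 1) []
  rw [List.nil_append] at hfold
  rw [hfold]
  have : (PySem.List.pyRange 0 n 1).map (fun i =>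
      longest_path_length ((pvCombine (build_graph T1) (build_graph T2)).insert i
        ((pvCombine (build_graph T1) (build_graph T2)).getD i [] ++ [i, i])))
      = (PySem.List.pyRange 0 n 1).map (fun _ => d) := List.map_congr_left (fun i _ => hiter i)
  rw [this, List.map_const']
  rw [PySem.List.length_pyRange_one]
  congr 1
  omega
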